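-- pv_equiv track=rewrite | github.com/dkimpara/dodgsonWinner | alg.py | greedy_score
-- ===== SOURCE A (Python) =====
-- from math import floor
--
-- def greedy_score(C: list, c: int, V: list) -> tuple:
--     """C is list of candidates 0 to m-1 (m candidates)
--     V is matrix of votes, v[i][0] is least preferred, v[m] most preferred
--     c is the candidate in question, int"""
--     C_minus_c = [d for d in C if d != c] #candidates without c
--
--     deficit, swaps = {}, {}
--     for d in C_minus_c: #initialize counter variables
--         deficit[d] = 0
--         swaps[d] = 0
--
--     for v in V:
--         i = 0
--         while v[i] != c:
--             d = v[i]
--             deficit[d] = deficit[d] - 1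
--             i += 1
--         if i < len(v) - 1:
--             d = v[i+1]
--             swaps[d] = swaps[d] + 1
--         i += 1
--         while i <= len(v) - 1:
--             d = v[i]
--             deficit[d] = deficit[d] + 1
--             i += 1
--
--     confident = True
--     #now calculate the score
--     score = 0
--     for d in C_minus_c:
--         if deficit[d] >= 0:
--             score += floor(deficit[d]/2) + 1
--             if deficit[d] >= 2 * swaps[d]:
--                 confident = False
--                 score += 1
--
--     return (score, confident)
-- ===== SOURCE B (Python) =====
-- def greedy_score(C, c, V):
--     # Split each ballot at the first occurrence of c, then score each
--     # candidate directly from occurrence counts -- no running dictionaries.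
--     splits = []
--     for v in V:
--         i = 0
--         while v[i] != c:
--             i += 1
--         splits.append((v[:i], v[i + 1:]))
--
--     score = 0
--     confident = True
--     for d in [e for e in C if e != c]:
--         deficit = sum(a.count(d) - b.count(d) for b, a in splits)
--         swaps = sum(1 for b, a in splits if a and a[0] == d)
--         if deficit >= 0:
--             score += deficit // 2 + 1
--             if deficit >= 2 * swaps:
--                 confident = False
--                 score += 1
--     return (score, confident)
-- ===== Notes on version B (the rewrite author's own statement) =====
-- stated objective: alternative
-- what changed: B drops A's running deficit/swaps dictionaries entirely: it splits each ballot once at the first occurrence of c and then scores each candidate directly from occurrence counts over the split ballots (per-candidate sums instead of dictionary accumulation).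
import Mathlib
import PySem

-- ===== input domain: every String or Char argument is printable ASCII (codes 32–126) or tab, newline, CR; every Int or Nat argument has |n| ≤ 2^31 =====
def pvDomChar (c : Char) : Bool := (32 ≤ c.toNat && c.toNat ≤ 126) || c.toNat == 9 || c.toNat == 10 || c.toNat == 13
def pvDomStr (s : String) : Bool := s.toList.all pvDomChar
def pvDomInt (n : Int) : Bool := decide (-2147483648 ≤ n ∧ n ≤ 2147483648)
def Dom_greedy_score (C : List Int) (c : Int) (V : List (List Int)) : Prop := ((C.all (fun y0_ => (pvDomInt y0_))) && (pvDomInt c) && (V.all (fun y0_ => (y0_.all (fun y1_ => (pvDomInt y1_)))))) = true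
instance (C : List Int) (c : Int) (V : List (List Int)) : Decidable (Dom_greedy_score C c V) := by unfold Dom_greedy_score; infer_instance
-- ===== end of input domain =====

-- B replaces A's running deficit/swaps dictionaries by splitting each ballot at c once
-- and scoring each candidate directly from occurrence counts (objective: alternative).

-- ===== PORT A =====
-- A's first while loop: scan v until c, decrementing deficit[v[i]]; returns the
-- updated dict and the remaining suffix v[i:] (empty when c is absent, where Python raises).
def pvWhileNe (c : Int) : List Int → PySem.Dict Int Int → PySem.Dict Int Int × List Int
  | [], deficit => (deficit, [])
  | x :: xs, deficit =>
    if x ≠ c then pvWhileNe c xs (deficit.insert x (deficit.getD x 0 - 1))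
    else (deficit, x :: xs)

-- one iteration of A's `for v in V` loop over the state (deficit, swaps)
def pvBallot (c : Int) (st : PySem.Dict Int Int × PySem.Dict Int Int) (v : List Int) :
    PySem.Dict Int Int × PySem.Dict Int Int :=
  let p := pvWhileNe c v st.1
  match p.2 with
  | [] => (p.1, st.2)            -- i = len(v): no swap, second while runs zero times
  | _ :: after =>
    (after.foldl (fun d x => d.insert x (d.getD x 0 + 1)) p.1,
     match after with
     | [] => st.2                -- i = len(v) - 1: `if i < len(v)-1` is false
     | e :: _ => st.2.insert e (st.2.getD e 0 + 1))

-- `floor(deficit[d]/2)` is ported as floordiv (exact for the int magnitudes here)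
def greedy_score (C : List Int) (c : Int) (V : List (List Int)) : Int × Bool :=
  let Cmc := C.filter (fun d => d ≠ c)
  let deficit0 := Cmc.foldl (fun d x => d.insert x (0 : Int)) PySem.Dict.empty
  let swaps0 := Cmc.foldl (fun d x => d.insert x (0 : Int)) PySem.Dict.empty
  let st := V.foldl (pvBallot c) (deficit0, swaps0)
  Cmc.foldl (fun (acc : Int × Bool) d =>
    if st.1.getD d 0 ≥ 0 then
      let s := acc.1 + PySem.Int.floordiv (st.1.getD d 0) 2 + 1
      if st.1.getD d 0 ≥ 2 * st.2.getD d 0 then (s + 1, false) else (s, acc.2)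
    else acc) (0, true)

-- ===== PORT B =====
-- B's while loop + slices: split v at the first occurrence of c
def pvSplitAtC (c : Int) : List Int → List Int × List Int
  | [] => ([], [])
  | x :: xs =>
    if x ≠ c then
      let p := pvSplitAtC c xs
      (x :: p.1, p.2)
    else ([], xs)

def greedy_score_alt (C : List Int) (c : Int) (V : List (List Int)) : Int × Bool :=
  let splits := V.map (pvSplitAtC c)
  (C.filter (fun e => e ≠ c)).foldl (fun (acc : Int × Bool) d =>
    let deficit := (splits.map (fun p => (PySem.List.count p.2 d : Int) - (PySem.List.count p.1 d : Int))).sum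
    let swaps := (splits.map (fun p => if p.2.head? = some d then (1 : Int) else 0)).sum
    if deficit ≥ 0 then
      let s := acc.1 + PySem.Int.floordiv deficit 2 + 1
      if deficit ≥ 2 * swaps then (s + 1, false) else (s, acc.2)
    else acc) (0, true)

-- ===== PRECONDITION & SPEC =====
-- Pre_: each ballot must contain c exactly once and every other entry must be in C;
-- otherwise Python's A raises (IndexError when c is absent, KeyError on a foreign or duplicate entry).
def Pre_greedy_score (C : List Int) (c : Int) (V : List (List Int)) : Prop :=
  ∀ v ∈ V, c ∈ v ∧ v.count c = 1 ∧ ∀ x ∈ v, x = c ∨ x ∈ C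
instance (C : List Int) (c : Int) (V : List (List Int)) : Decidable (Pre_greedy_score C c V) := by unfold Pre_greedy_score; infer_instance
def pvWitness_greedy_score : List Int × Int × List (List Int) := ([0, 1, 2], 0, [[1, 0, 2], [2, 1, 0]])

def Spec_greedy_score (C : List Int) (c : Int) (V : List (List Int)) (out : Int × Bool) : Prop := out = greedy_score_alt C c V
instance (C : List Int) (c : Int) (V : List (List Int)) (out : Int × Bool) : Decidable (Spec_greedy_score C c V out) := by unfold Spec_greedy_score; infer_instance

-- ===== CLAIM (what is proved, stated in full; the proofs are below) =====
def Claim_equal_greedy_score : Prop := ∀ (C : List Int) (c : Int) (V : List (List Int)), Dom_greedy_score C c V → Pre_greedy_score C c V → Spec_greedy_score C c V (greedy_score C c V)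
-- ===== LEMMAS AND PROOFS =====
theorem init_getD_zero (L : List Int) (dd : PySem.Dict Int Int)
    (h : ∀ e, dd.getD e 0 = 0) (d : Int) :
    (L.foldl (fun d x => d.insert x (0 : Int)) dd).getD d 0 = 0 := by
  induction L generalizing dd with
  | nil => exact h d
  | cons x xs ih =>
    simp only [List.foldl_cons]
    exact ih _ (fun e => by rw [PySem.Dict.getD_insert]; split <;> simp [h])

theorem dec_fold_getD (L : List Int) (dd : PySem.Dict Int Int) (d : Int) :
    (L.foldl (fun d x => d.insert x (d.getD x 0 - 1)) dd).getD d 0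
      = dd.getD d 0 - L.count d := by
  induction L generalizing dd with
  | nil => simp
  | cons x xs ih =>
    simp only [List.foldl_cons, ih, List.count_cons, PySem.Dict.getD_insert]
    by_cases h : d = x
    · subst h; simp; ring
    · simp [h, Ne.symm h]

theorem inc_fold_getD (L : List Int) (dd : PySem.Dict Int Int) (d : Int) :
    (L.foldl (fun d x => d.insert x (d.getD x 0 + 1)) dd).getD d 0
      = dd.getD d 0 + L.count d := by
  induction L generalizing dd with
  | nil => simp
  | cons x xs ih =>
    simp only [List.foldl_cons, ih, List.count_cons, PySem.Dict.getD_insert]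
    by_cases h : d = x
    · subst h; simp; ring
    · simp [h, Ne.symm h]

theorem whileNe_eq (c : Int) (v : List Int) (dd : PySem.Dict Int Int) :
    pvWhileNe c v dd
      = ((pvSplitAtC c v).1.foldl (fun d x => d.insert x (d.getD x 0 - 1)) dd,
         if c ∈ v then c :: (pvSplitAtC c v).2 else []) := by
  induction v generalizing dd with
  | nil => simp [pvWhileNe, pvSplitAtC]
  | cons x xs ih =>
    by_cases h : x = c
    · simp [pvWhileNe, pvSplitAtC, h]
    · simp [pvWhileNe, pvSplitAtC, h, ih, Ne.symm h]

theorem ballot_fst_getD (c : Int) (st : PySem.Dict Int Int × PySem.Dict Int Int)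
    (v : List Int) (d : Int) :
    (pvBallot c st v).1.getD d 0
      = st.1.getD d 0 - (pvSplitAtC c v).1.count d + (pvSplitAtC c v).2.count d := by
  unfold pvBallot
  rw [whileNe_eq]
  by_cases h : c ∈ v
  · cases hs : (pvSplitAtC c v).2 with
    | nil => simp [h, dec_fold_getD]
    | cons e rest =>
      simp only [h, if_true]
      simp only [List.foldl_cons, inc_fold_getD, dec_fold_getD,
        PySem.Dict.getD_insert, List.count_cons]
      by_cases hd : d = e
      · subst hd; simp; push_cast; ring
      · simp [hd, Ne.symm hd]
  · have h2 : (pvSplitAtC c v).2 = [] := by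
      induction v with
      | nil => simp [pvSplitAtC]
      | cons x xs ih2 =>
        simp only [List.mem_cons, not_or] at h
        simp [pvSplitAtC, Ne.symm h.1, ih2 h.2]
    simp [h, h2, dec_fold_getD]

theorem ballot_snd_getD (c : Int) (st : PySem.Dict Int Int × PySem.Dict Int Int)
    (v : List Int) (d : Int) :
    (pvBallot c st v).2.getD d 0
      = st.2.getD d 0 + (if (pvSplitAtC c v).2.head? = some d then (1 : Int) else 0) := by
  unfold pvBallot
  rw [whileNe_eq]
  by_cases h : c ∈ v
  · cases hs : (pvSplitAtC c v).2 with
    | nil => simp [h]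
    | cons e rest =>
      simp only [h, if_true]
      simp only [PySem.Dict.getD_insert, List.head?_cons]
      by_cases hd : d = e
      · subst hd; simp
      · simp [hd, Ne.symm hd]
  · have h2 : (pvSplitAtC c v).2 = [] := by
      induction v with
      | nil => simp [pvSplitAtC]
      | cons x xs ih2 =>
        simp only [List.mem_cons, not_or] at h
        simp [pvSplitAtC, Ne.symm h.1, ih2 h.2]
    simp [h, h2]

theorem main_fold_getD (c : Int) (V : List (List Int))
    (st : PySem.Dict Int Int × PySem.Dict Int Int) (d : Int) :
    (V.foldl (pvBallot c) st).1.getD d 0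
        = st.1.getD d 0
          + ((V.map (pvSplitAtC c)).map
              (fun p => ((p.2.count d : Int) - (p.1.count d : Int)))).sum
    ∧ (V.foldl (pvBallot c) st).2.getD d 0
        = st.2.getD d 0
          + ((V.map (pvSplitAtC c)).map
              (fun p => if p.2.head? = some d then (1 : Int) else 0)).sum := by
  induction V generalizing st with
  | nil => simp
  | cons v vs ih =>
    obtain ⟨ih1, ih2⟩ := ih (pvBallot c st v)
    constructor
    · simp only [List.foldl_cons, List.map_cons, List.sum_cons, ih1,
        ballot_fst_getD]
      ring
    · simp only [List.foldl_cons, List.map_cons, List.sum_cons, ih2,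
        ballot_snd_getD]
      ring

theorem greedy_eq (C : List Int) (c : Int) (V : List (List Int)) :
    greedy_score C c V = greedy_score_alt C c V := by
  unfold greedy_score greedy_score_alt
  simp only [PySem.List.count_eq]
  apply PySem.List.foldl_congr_mem
  intro acc d _
  have h0 : ∀ e, (PySem.Dict.empty (κ := Int) (ν := Int)).getD e 0 = 0 := by
    intro e; simp
  have h1 := (main_fold_getD c V
      ((C.filter (fun d => d ≠ c)).foldl (fun d x => d.insert x (0 : Int)) PySem.Dict.empty,
       (C.filter (fun d => d ≠ c)).foldl (fun d x => d.insert x (0 : Int)) PySem.Dict.empty) d)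
  rw [h1.1, h1.2, init_getD_zero _ _ h0]
  simp

-- ===== VERDICT (by name: the statement is the Claim_ definition above) =====
theorem greedy_score_spec : Claim_equal_greedy_score := by
  intro C c V _ _
  unfold Spec_greedy_score
  exact greedy_eq C c V
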